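-- pv_equiv track=rewrite | github.com/HYU-NLP/CLIO_SRL | inference.py | find_arg_in_pred
-- ===== SOURCE A (Python) =====
-- def find_arg_in_pred(p):
--     ## 0번은 [CLS]라 제외해야함
--     p = p[1:]
--     if 'B-ARG0' in p:
--         start_idx = p.index('B-ARG0')
--         end_idx = start_idx
--         try:
--             while p[end_idx+1] == 'I-ARG0':
--                 end_idx += 1
--         except:
--             pass
--         arg0 = (start_idx+1, end_idx+1)
--     else:
--         arg0 = None
--
--     if 'B-ARG1' in p:
--         start_idx = p.index('B-ARG1')
--         end_idx = start_idx
--         try: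
--             while p[end_idx+1] == 'I-ARG1':
--                 end_idx += 1
--         except:
--             pass
--         arg1 = (start_idx+1, end_idx+1)
--     else:
--         arg1 = None
--
--     return arg0, arg1
-- ===== SOURCE B (Python) =====
-- def find_arg_in_pred(p):
--     a0 = None  # (start, end) 0-based within p[1:], first B-ARG0 span
--     a1 = None
--     for i, tok in enumerate(p[1:]):
--         if a0 is None:
--             if tok == 'B-ARG0':
--                 a0 = (i, i)
--         elif a0[1] == i - 1 and tok == 'I-ARG0':
--             a0 = (a0[0], i)
--         if a1 is None:
--             if tok == 'B-ARG1':
--                 a1 = (i, i)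
--         elif a1[1] == i - 1 and tok == 'I-ARG1':
--             a1 = (a1[0], i)
--     arg0 = None if a0 is None else (a0[0] + 1, a0[1] + 1)
--     arg1 = None if a1 is None else (a1[0] + 1, a1[1] + 1)
--     return arg0, arg1
-- ===== Notes on version B (the rewrite author's own statement) =====
-- stated objective: alternative
-- what changed: Replaces the two membership+index+while-extension scans with a single pass over enumerate(p[1:]) that maintains both spans as state, extending each span only while the next index is contiguous.
import Mathlib
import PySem

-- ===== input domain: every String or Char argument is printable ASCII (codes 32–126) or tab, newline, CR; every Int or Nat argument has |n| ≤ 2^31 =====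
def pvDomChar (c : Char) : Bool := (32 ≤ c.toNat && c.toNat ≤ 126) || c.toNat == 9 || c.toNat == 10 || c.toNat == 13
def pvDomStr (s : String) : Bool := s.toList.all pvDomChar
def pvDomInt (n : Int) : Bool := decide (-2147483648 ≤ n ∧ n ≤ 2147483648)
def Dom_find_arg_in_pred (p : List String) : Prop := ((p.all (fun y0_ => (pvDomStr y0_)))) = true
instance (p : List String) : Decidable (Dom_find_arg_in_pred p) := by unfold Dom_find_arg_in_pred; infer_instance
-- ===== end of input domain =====

-- B replaces A's two membership/index/while scans by a single stateful pass over enumerate(p[1:]);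
-- same return value, different decomposition (objective: alternative).

-- ===== PORT A =====
-- A's 'while p[end_idx+1] == itag: end_idx += 1' with the try/except stopping at IndexError.
-- The index end_idx+1 is always ≥ 1, so Python's p[end_idx+1] is plain forward indexing; the loop
-- continues exactly when q[e+1]? = some itag (an IndexError gives none, a different token fails the test).
def pvExtendA (q : List String) (itag : String) (e : Nat) : Nat :=
  if h : q[e+1]? = some itag then pvExtendA q itag (e+1) else e
termination_by q.length - e
decreasing_by
  obtain ⟨h1, -⟩ := List.getElem?_eq_some_iff.mp h
  omega

-- one of A's two identical blocks: 'if btag in p: start = p.index(btag); extend; (start+1, end+1) else None'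
-- (p.index never raises here because membership was just checked; .getD 0 is never the default)
def pvBlockA (q : List String) (btag itag : String) : Option (Int × Int) :=
  if btag ∈ q then
    some ((((PySem.List.index? q btag).getD 0 : Nat) : Int) + 1,
          ((pvExtendA q itag ((PySem.List.index? q btag).getD 0) : Nat) : Int) + 1)
  else none

def find_arg_in_pred (p : List String) : (Option (Int × Int)) × (Option (Int × Int)) :=
  let q := p.drop 1
  (pvBlockA q "B-ARG0" "I-ARG0", pvBlockA q "B-ARG1" "I-ARG1")

-- ===== PORT B =====
-- one span's update inside B's loop body (the a0/a1 branches of Source B)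
def pvStepB (btag itag : String) (s : Option (Int × Int)) (i : Int) (tok : String) : Option (Int × Int) :=
  match s with
  | none => if tok = btag then some (i, i) else none
  | some (st, e) => if e = i - 1 ∧ tok = itag then some (st, i) else some (st, e)

def find_arg_in_pred_alt (p : List String) : (Option (Int × Int)) × (Option (Int × Int)) :=
  let r := (PySem.List.enumerate (p.drop 1) 0).foldl
    (fun (s : Option (Int × Int) × Option (Int × Int)) (it : Int × String) =>
      (pvStepB "B-ARG0" "I-ARG0" s.1 it.1 it.2, pvStepB "B-ARG1" "I-ARG1" s.2 it.1 it.2))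
    (none, none)
  (r.1.map (fun a => (a.1 + 1, a.2 + 1)), r.2.map (fun a => (a.1 + 1, a.2 + 1)))

-- ===== PRECONDITION & SPEC =====
def Spec_find_arg_in_pred (p : List String) (out : (Option (Int × Int)) × (Option (Int × Int))) : Prop := out = find_arg_in_pred_alt p
instance (p : List String) (out : (Option (Int × Int)) × (Option (Int × Int))) : Decidable (Spec_find_arg_in_pred p out) := by unfold Spec_find_arg_in_pred; infer_instance

-- ===== CLAIM (what is proved, stated in full; the proofs are below) =====
def Claim_equal_find_arg_in_pred : Prop := ∀ (p : List String), Dom_find_arg_in_pred p → Spec_find_arg_in_pred p (find_arg_in_pred p)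

-- ===== LEMMAS AND PROOFS =====

-- B's fold for one span only
def pvFoldB (btag itag : String) (l : List (Int × String)) (s : Option (Int × Int)) : Option (Int × Int) :=
  l.foldl (fun s it => pvStepB btag itag s it.1 it.2) s

theorem pvFoldB_cons (btag itag : String) (j : Int) (x : String) (l : List (Int × String))
    (s : Option (Int × Int)) :
    pvFoldB btag itag ((j, x) :: l) s = pvFoldB btag itag l (pvStepB btag itag s j x) := rfl

-- the product fold is the pair of the two single-span folds
theorem pvFold_split (l : List (Int × String)) (s : Option (Int × Int) × Option (Int × Int)) :
    l.foldl (fun (s : Option (Int × Int) × Option (Int × Int)) (it : Int × String) =>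
      (pvStepB "B-ARG0" "I-ARG0" s.1 it.1 it.2, pvStepB "B-ARG1" "I-ARG1" s.2 it.1 it.2)) s
    = (pvFoldB "B-ARG0" "I-ARG0" l s.1, pvFoldB "B-ARG1" "I-ARG1" l s.2) := by
  induction l generalizing s with
  | nil => rfl
  | cons x xs ih =>
    rw [List.foldl_cons]
    exact ih (pvStepB "B-ARG0" "I-ARG0" s.1 x.1 x.2, pvStepB "B-ARG1" "I-ARG1" s.2 x.1 x.2)

-- a closed span (end index < k-1) is frozen for the rest of the scan
theorem pvFoldB_frozen (btag itag : String) (q : List String) (k : Int) (st e : Int)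
    (he : e < k - 1) :
    pvFoldB btag itag (PySem.List.enumerate q k) (some (st, e)) = some (st, e) := by
  induction q generalizing k with
  | nil => rfl
  | cons x xs ih =>
    rw [PySem.List.enumerate_cons, pvFoldB_cons]
    have hstep : pvStepB btag itag (some (st, e)) k x = some (st, e) := by
      simp only [pvStepB]
      rw [if_neg (by rintro ⟨h1, -⟩; omega)]
    rw [hstep]
    exact ih (k + 1) (by omega)

-- an open span (end index = k-1) extends by exactly the itag-prefix of the rest
theorem pvFoldB_open (btag itag : String) (q : List String) (k : Int) (st : Int) :
    pvFoldB btag itag (PySem.List.enumerate q k) (some (st, k - 1))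
    = some (st, k - 1 + ((q.takeWhile (· = itag)).length : Int)) := by
  induction q generalizing k with
  | nil => simp [pvFoldB, PySem.List.enumerate_nil]
  | cons x xs ih =>
    rw [PySem.List.enumerate_cons, pvFoldB_cons]
    by_cases hx : x = itag
    · have hstep : pvStepB btag itag (some (st, k - 1)) k x = some (st, k) := by
        simp [pvStepB, hx]
      rw [hstep]
      have h2 := ih (k + 1)
      rw [show k + 1 - 1 = k by ring] at h2
      rw [h2]
      simp [hx]
    · have hstep : pvStepB btag itag (some (st, k - 1)) k x = some (st, k - 1) := by
        simp only [pvStepB]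
        rw [if_neg (by rintro ⟨-, h⟩; exact hx h)]
      rw [hstep, pvFoldB_frozen btag itag xs (k + 1) st (k - 1) (by omega)]
      simp [hx]

-- no btag anywhere: the span is never opened
theorem pvFoldB_none (btag itag : String) (q : List String) (k : Int) (hb : btag ∉ q) :
    pvFoldB btag itag (PySem.List.enumerate q k) none = none := by
  induction q generalizing k with
  | nil => rfl
  | cons x xs ih =>
    rw [PySem.List.enumerate_cons, pvFoldB_cons]
    have hstep : pvStepB btag itag none k x = none := by
      simp only [pvStepB]
      rw [if_neg (by rintro rfl; exact hb List.mem_cons_self)]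
    rw [hstep]
    exact ih (k + 1) (fun h => hb (List.mem_cons_of_mem _ h))

-- first btag at position j: the fold returns (k+j, k+j + itag-prefix after it)
theorem pvFoldB_found (btag itag : String) (q : List String) (k : Int) (j : Nat)
    (hj : PySem.List.index? q btag = some j) :
    pvFoldB btag itag (PySem.List.enumerate q k) none
    = some (k + j, k + j + (((q.drop (j + 1)).takeWhile (· = itag)).length : Int)) := by
  induction q generalizing k j with
  | nil => simp [PySem.List.index?_eq_idxOf?] at hj
  | cons x xs ih =>
    rw [PySem.List.enumerate_cons, pvFoldB_cons]
    by_cases hx : x = btag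
    · have hj0 : j = 0 := by
        rw [hx, PySem.List.index?_cons_self] at hj
        exact (Option.some_inj.mp hj).symm
      subst hj0
      have hstep : pvStepB btag itag none k x = some (k, k) := by
        simp only [pvStepB]
        rw [if_pos hx]
      rw [hstep]
      have h2 := pvFoldB_open btag itag xs (k + 1) k
      rw [show k + 1 - 1 = k by ring] at h2
      rw [h2]
      simp [List.drop_succ_cons]
    · have hstep : pvStepB btag itag none k x = none := by
        simp only [pvStepB]
        rw [if_neg hx]
      rw [hstep]
      rw [PySem.List.index?_cons_of_ne xs hx] at hj
      cases hj' : PySem.List.index? xs btag with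
      | none => rw [hj'] at hj; simp at hj
      | some j' =>
        rw [hj'] at hj
        simp only [Option.map_some, Option.some.injEq] at hj
        subst hj
        rw [ih (k + 1) j' hj']
        rw [show j' + 1 + 1 = (j' + 1) + 1 from rfl, List.drop_succ_cons]
        simp only [Option.some.injEq, Prod.mk.injEq]
        constructor <;> push_cast <;> ring

-- A's while-loop extension measured by takeWhile
theorem pvExtendA_eq (q : List String) (itag : String) :
    ∀ (n s : Nat), q.length - s ≤ n →
    pvExtendA q itag s = s + ((q.drop (s + 1)).takeWhile (· = itag)).length := by
  intro n
  induction n with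
  | zero =>
    intro s hs
    rw [pvExtendA]
    have hg : q[s + 1]? = none := by rw [List.getElem?_eq_none_iff]; omega
    rw [dif_neg (by rw [hg]; simp)]
    have hd : q.drop (s + 1) = [] := List.drop_eq_nil_of_le (by omega)
    simp [hd]
  | succ n ih =>
    intro s hs
    rw [pvExtendA]
    by_cases h : q[s + 1]? = some itag
    · obtain ⟨hlt, hget⟩ := List.getElem?_eq_some_iff.mp h
      have hd : q.drop (s + 1) = itag :: q.drop (s + 2) := by
        rw [List.drop_eq_getElem_cons hlt, hget]
      rw [dif_pos h, ih (s + 1) (by omega), hd, List.takeWhile_cons]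
      simp only [decide_true, if_true, List.length_cons]
      have h12 : s + 1 + 1 = s + 2 := rfl
      rw [h12]
      omega
    · rw [dif_neg h]
      cases hg : q[s + 1]? with
      | none =>
        have hd : q.drop (s + 1) = [] := List.drop_eq_nil_of_le (by
          rw [List.getElem?_eq_none_iff] at hg; omega)
        simp [hd]
      | some t =>
        obtain ⟨hlt, hget⟩ := List.getElem?_eq_some_iff.mp hg
        have hd : q.drop (s + 1) = t :: q.drop (s + 2) := by
          rw [List.drop_eq_getElem_cons hlt, hget]
        have ht : ¬ t = itag := by rintro rfl; exact h hg
        rw [hd, List.takeWhile_cons, if_neg (by simp [ht])]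
        simp

-- the single-span agreement, from which the claim follows componentwise
theorem pvBlock_eq (q : List String) (btag itag : String) :
    pvBlockA q btag itag
    = (pvFoldB btag itag (PySem.List.enumerate q 0) none).map (fun a => (a.1 + 1, a.2 + 1)) := by
  unfold pvBlockA
  by_cases hb : btag ∈ q
  · rw [if_pos hb]
    cases hj : PySem.List.index? q btag with
    | none => exact absurd hb ((PySem.List.index?_eq_none_iff q btag).mp hj)
    | some j =>
      rw [pvFoldB_found btag itag q 0 j hj]
      simp only [Option.getD_some, Option.map_some, Option.some.injEq, Prod.mk.injEq]
      rw [pvExtendA_eq q itag q.length j (by omega)]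
      constructor <;> push_cast <;> ring
  · rw [if_neg hb, pvFoldB_none btag itag q 0 hb]
    rfl

-- ===== VERDICT (by name: the statement is the Claim_ definition above) =====
theorem find_arg_in_pred_spec : Claim_equal_find_arg_in_pred := by
  intro p _
  unfold Spec_find_arg_in_pred find_arg_in_pred find_arg_in_pred_alt
  rw [pvFold_split]
  exact congrArg₂ Prod.mk (pvBlock_eq _ _ _) (pvBlock_eq _ _ _)
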